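-- pv_equiv track=rewrite | github.com/dorcha-inc/orla | pretty_scripts/figlet_with_symbols.py | apply_color
-- ===== SOURCE A (Python) =====
-- COLORS = {
--     "irish_green": (0, 154, 0),
--     "green": (0, 255, 0),
--     "red": (255, 0, 0),
--     "blue": (0, 0, 255),
--     "yellow": (255, 255, 0),
--     "cyan": (0, 255, 255),
--     "magenta": (255, 0, 255),
--     "white": (255, 255, 255),
--     "orange": (255, 165, 0),
--     "purple": (128, 0, 128),
--     "pink": (255, 192, 203),
--     "none": None,  # No color
-- }
--
-- def rgb_to_ansi(r, g, b):
--     """Convert RGB to ANSI truecolor escape code."""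
--     return f"\033[38;2;{r};{g};{b}m"
--
-- def apply_color(text, color_name):
--     """Apply color to text if color is specified."""
--     if color_name == "none" or color_name not in COLORS:
--         return text
--
--     rgb = COLORS[color_name]
--     if rgb is None:
--         return text
--
--     color_code = rgb_to_ansi(*rgb)
--     reset = "\033[0m"
--
--     # Apply color to each line (but preserve ANSI codes if any)
--     lines = text.split("\n")
--     colored_lines = []
--     for line in lines:
--         if line.strip():
--             colored_lines.append(f"{color_code}{line}{reset}")
--         else:
--             colored_lines.append(line)
--
--     return "\n".join(colored_lines)
-- ===== SOURCE B (Python) =====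
-- COLORS = {
--     "irish_green": (0, 154, 0),
--     "green": (0, 255, 0),
--     "red": (255, 0, 0),
--     "blue": (0, 0, 255),
--     "yellow": (255, 255, 0),
--     "cyan": (0, 255, 255),
--     "magenta": (255, 0, 255),
--     "white": (255, 255, 255),
--     "orange": (255, 165, 0),
--     "purple": (128, 0, 128),
--     "pink": (255, 192, 203),
--     "none": None,  # No color
-- }
--
-- def apply_color(text, color_name):
--     """Apply color to text if color is specified."""
--     rgb = COLORS.get(color_name)
--     if rgb is None:
--         return text
--
--     color = "\033[38;2;{};{};{}m".format(*rgb)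
--     reset = "\033[0m"
--
--     # Single character-level pass: buffer the current line, remember whether it
--     # holds any non-whitespace character, and wrap it when the line ends.
--     out = []
--     cur = []
--     has = False
--     for ch in text:
--         if ch == "\n":
--             out.append(color + "".join(cur) + reset if has else "".join(cur))
--             out.append("\n")
--             cur = []
--             has = False
--         else:
--             cur.append(ch)
--             has = has or not ch.isspace()
--     out.append(color + "".join(cur) + reset if has else "".join(cur))
--     return "".join(out)
-- ===== Notes on version B (the rewrite author's own statement) =====
-- stated objective: alternative
-- what changed: B replaces A's split('\n')/per-line strip()/join pipeline (plus the three separate guards) with one dict .get guard and a single character-level pass that buffers the current line and a has-non-whitespace flag, wrapping each line as it ends.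
import Mathlib
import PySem

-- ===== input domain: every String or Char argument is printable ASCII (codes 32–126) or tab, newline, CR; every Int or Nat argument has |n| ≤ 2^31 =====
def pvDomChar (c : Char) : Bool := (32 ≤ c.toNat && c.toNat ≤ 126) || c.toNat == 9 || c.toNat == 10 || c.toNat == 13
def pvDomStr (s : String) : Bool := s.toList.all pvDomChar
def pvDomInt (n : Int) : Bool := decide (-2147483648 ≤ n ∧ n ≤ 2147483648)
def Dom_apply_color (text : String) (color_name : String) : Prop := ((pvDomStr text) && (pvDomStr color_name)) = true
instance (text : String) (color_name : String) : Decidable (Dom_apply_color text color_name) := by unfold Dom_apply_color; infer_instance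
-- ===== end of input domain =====

-- B replaces A's split/strip/join pipeline with a single character-level pass over the text (alternative decomposition, same cost).

-- module constant COLORS (shared by both Pythons)
def pvCOLORS : PySem.Dict String (Option (Int × Int × Int)) := PySem.Dict.ofList
  [ ("irish_green", some (0, 154, 0)), ("green", some (0, 255, 0)), ("red", some (255, 0, 0)),
    ("blue", some (0, 0, 255)), ("yellow", some (255, 255, 0)), ("cyan", some (0, 255, 255)),
    ("magenta", some (255, 0, 255)), ("white", some (255, 255, 255)), ("orange", some (255, 165, 0)),
    ("purple", some (128, 0, 128)), ("pink", some (255, 192, 203)), ("none", none) ]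

-- ===== PORT A =====
-- rgb_to_ansi: f"\033[38;2;{r};{g};{b}m"
def pvRgbToAnsi (r g b : Int) : List Char :=
  "\x1b[38;2;".toList ++ PySem.Int.toChars r ++ [';'] ++ PySem.Int.toChars g ++ [';'] ++ PySem.Int.toChars b ++ ['m']

def apply_color (text : String) (color_name : String) : String :=
  if color_name = "none" ∨ pvCOLORS.contains color_name = false then text
  else
    match pvCOLORS.getD color_name none with
    | none => text
    | some (r, g, b) =>
      let color_code := pvRgbToAnsi r g b
      let reset := "\x1b[0m".toList
      let lines := PySem.Chars.splitOn text.toList ['\n']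
      let colored_lines := lines.foldl
        (fun acc line => acc ++ [if PySem.Chars.strip line ≠ [] then color_code ++ line ++ reset else line]) []
      String.ofList (PySem.Chars.join ['\n'] colored_lines)

-- ===== PORT B =====
-- loop body of Source B's character pass: state = (out, cur, has)
def pvStepB (color reset : List Char) (st : List Char × List Char × Bool) (ch : Char) :
    List Char × List Char × Bool :=
  if ch = '\n' then
    (st.1 ++ (if st.2.2 then color ++ st.2.1 ++ reset else st.2.1) ++ ['\n'], [], false)
  else
    (st.1, st.2.1 ++ [ch], st.2.2 || !PySem.Chars.isspace ch)

def apply_color_alt (text : String) (color_name : String) : String :=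
  match pvCOLORS.get? color_name with
  | none => text
  | some none => text
  | some (some (r, g, b)) =>
    let color := "\x1b[38;2;".toList ++ PySem.Int.toChars r ++ [';'] ++ PySem.Int.toChars g ++ [';'] ++ PySem.Int.toChars b ++ ['m']
    let reset := "\x1b[0m".toList
    let s := text.toList.foldl (pvStepB color reset) ([], [], false)
    String.ofList (s.1 ++ (if s.2.2 then color ++ s.2.1 ++ reset else s.2.1))

-- ===== PRECONDITION & SPEC =====
def Spec_apply_color (text : String) (color_name : String) (out : String) : Prop := out = apply_color_alt text color_name
instance (text : String) (color_name : String) (out : String) : Decidable (Spec_apply_color text color_name out) := by unfold Spec_apply_color; infer_instance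

-- ===== CLAIM (what is proved, stated in full; the proofs are below) =====
def Claim_equal_apply_color : Prop := ∀ (text : String) (color_name : String), Dom_apply_color text color_name → Spec_apply_color text color_name (apply_color text color_name)

-- ===== LEMMAS AND PROOFS =====
def pvSp : List Char → List (List Char)
  | [] => [[]]
  | c :: r => if c = '\n' then [] :: pvSp r else (pvSp r).modifyHead (c :: ·)

theorem pvSp_ne_nil (cs : List Char) : pvSp cs ≠ [] := by
  cases cs with
  | nil => simp [pvSp]
  | cons c r =>
    simp only [pvSp]
    split
    · simp
    · cases h : pvSp r with
      | nil => exact absurd h (pvSp_ne_nil r)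
      | cons a t => simp [List.modifyHead]

theorem pv_go_eq (fuel : Nat) : ∀ (l cur : List Char) (acc : List (List Char)), l.length ≤ fuel →
    PySem.Chars.splitOn.go ['\n'] fuel l cur acc
      = acc.reverse ++ (pvSp l).modifyHead (cur.reverse ++ ·) := by
  induction fuel with
  | zero =>
    intro l cur acc h
    have : l = [] := by cases l <;> simp_all
    subst this
    rw [PySem.Chars.splitOn.go]
    simp [pvSp, List.modifyHead]
  | succ n ih =>
    intro l cur acc h
    cases l with
    | nil =>
      rw [PySem.Chars.splitOn.go]
      simp [pvSp, List.modifyHead]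
      omega
    | cons c rest =>
      rw [PySem.Chars.splitOn.go]
      by_cases hc : c = '\n'
      · subst hc
        rw [if_pos (by simp)]
        simp only [List.length_nil, List.length_cons, Nat.zero_add, List.drop_succ_cons,
          List.drop_zero]
        rw [ih rest [] (cur.reverse :: acc) (by simp at h; omega)]
        simp only [pvSp, List.modifyHead, List.reverse_cons, List.reverse_nil,
          List.nil_append, List.append_assoc, List.singleton_append]
        cases hr : pvSp rest <;> simp
      · rw [if_neg (by simp; exact fun hh => hc hh.symm)]
        rw [ih rest (c :: cur) acc (by simp at h; omega)]
        simp only [pvSp, if_neg hc, List.modifyHead_modifyHead]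
        cases hr : pvSp rest with
        | nil => exact absurd hr (pvSp_ne_nil rest)
        | cons a t => simp [List.modifyHead]

theorem pv_splitOn_nl (cs : List Char) : PySem.Chars.splitOn cs ['\n'] = pvSp cs := by
  unfold PySem.Chars.splitOn
  rw [pv_go_eq (cs.length + 1) cs [] [] (by omega)]
  cases h : pvSp cs <;> simp [List.modifyHead]

theorem pv_rstrip_eq_nil_iff (cs : List Char) :
    PySem.Chars.rstrip cs = [] ↔ ∀ c ∈ cs, PySem.Chars.isspace c = true := by
  simp [PySem.Chars.rstrip, List.dropWhile_eq_nil_iff]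

theorem pv_strip_eq_nil_iff (cs : List Char) :
    PySem.Chars.strip cs = [] ↔ ∀ c ∈ cs, PySem.Chars.isspace c = true := by
  rw [PySem.Chars.strip, pv_rstrip_eq_nil_iff]
  constructor
  · intro h c hc
    have hsplit : c ∈ List.takeWhile PySem.Chars.isspace cs ++ List.dropWhile PySem.Chars.isspace cs := by
      rw [List.takeWhile_append_dropWhile]; exact hc
    rcases List.mem_append.1 hsplit with h1 | h2
    · exact List.mem_takeWhile_imp h1
    · exact h c h2
  · intro h c hc
    exact h c ((List.dropWhile_suffix _).subset hc)

theorem pv_any_eq_strip (cs : List Char) :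
    (cs.any fun c => !PySem.Chars.isspace c) = decide (PySem.Chars.strip cs ≠ []) := by
  by_cases h : PySem.Chars.strip cs = []
  · simp only [h, ne_eq, not_true_eq_false, decide_false]
    rw [pv_strip_eq_nil_iff] at h
    simp_all
  · simp only [h, ne_eq, not_false_eq_true, decide_true]
    rw [pv_strip_eq_nil_iff] at h
    push Not at h
    obtain ⟨c, hc, hn⟩ := h
    exact List.any_eq_true.2 ⟨c, hc, by simp [hn]⟩

def pvColorize (color reset line : List Char) : List Char :=
  if PySem.Chars.strip line ≠ [] then color ++ line ++ reset else line

theorem pv_flush_eq (color reset cur : List Char) :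
    (if (cur.any fun c => !PySem.Chars.isspace c) then color ++ cur ++ reset else cur)
      = pvColorize color reset cur := by
  rw [pv_any_eq_strip]
  by_cases h : PySem.Chars.strip cur = [] <;> simp [pvColorize, h]

def pvFin (color reset : List Char) (s : List Char × List Char × Bool) : List Char :=
  s.1 ++ (if s.2.2 then color ++ s.2.1 ++ reset else s.2.1)

theorem pv_fold_eq (color reset : List Char) (cs : List Char) :
    ∀ (out cur : List Char),
    pvFin color reset
      (cs.foldl (pvStepB color reset) (out, cur, cur.any (fun c => !PySem.Chars.isspace c)))
    = out ++ PySem.Chars.join ['\n'] (((pvSp cs).modifyHead (cur ++ ·)).map (pvColorize color reset)) := by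
  induction cs with
  | nil =>
    intro out cur
    simp only [List.foldl_nil, pvSp, List.modifyHead, List.append_nil, List.map_cons, List.map_nil,
      PySem.Chars.join_singleton, pvFin]
    rw [pv_flush_eq]
  | cons c rest ih =>
    intro out cur
    by_cases hc : c = '\n'
    · subst hc
      have hstep : pvStepB color reset (out, cur, cur.any (fun c => !PySem.Chars.isspace c)) '\n'
          = (out ++ (if (cur.any fun c => !PySem.Chars.isspace c) then color ++ cur ++ reset else cur) ++ ['\n'],
             [], ([].any fun c => !PySem.Chars.isspace c)) := by
        simp [pvStepB]
      rw [List.foldl_cons, hstep,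
        ih (out ++ (if (cur.any fun c => !PySem.Chars.isspace c) then color ++ cur ++ reset else cur) ++ ['\n']) []]
      rw [pv_flush_eq]
      simp only [pvSp, reduceIte]
      cases hr : pvSp rest with
      | nil => exact absurd hr (pvSp_ne_nil rest)
      | cons a t =>
        simp [List.modifyHead, PySem.Chars.join_cons_cons]
    · have hstep : pvStepB color reset (out, cur, cur.any (fun c => !PySem.Chars.isspace c)) c
          = (out, cur ++ [c], (cur ++ [c]).any fun c => !PySem.Chars.isspace c) := by
        simp [pvStepB, hc]
      rw [List.foldl_cons, hstep, ih out (cur ++ [c])]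
      simp only [pvSp, if_neg hc, List.modifyHead_modifyHead]
      cases hr : pvSp rest with
      | nil => exact absurd hr (pvSp_ne_nil rest)
      | cons a t => simp [List.modifyHead]

theorem pv_any_eq_find?_isSome {α : Type} (p : α → Bool) (l : List α) :
    l.any p = (l.find? p).isSome := by
  induction l with
  | nil => rfl
  | cons a t ih => by_cases h : p a <;> simp [h, ih]

theorem pv_contains_eq {κ ν : Type} [BEq κ] (d : PySem.Dict κ ν) (k : κ) :
    d.contains k = (d.get? k).isSome := by
  simp [PySem.Dict.contains, PySem.Dict.get?, pv_any_eq_find?_isSome]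

-- ===== VERDICT (by name: the statement is the Claim_ definition above) =====
theorem apply_color_spec : Claim_equal_apply_color := by
  intro text color_name _
  unfold Spec_apply_color apply_color apply_color_alt
  cases hg : pvCOLORS.get? color_name with
  | none =>
    have hc : pvCOLORS.contains color_name = false := by rw [pv_contains_eq, hg]; rfl
    rw [if_pos (Or.inr hc)]
  | some v =>
    cases v with
    | none =>
      by_cases hn : color_name = "none"
      · rw [if_pos (Or.inl hn)]
      · have hc : pvCOLORS.contains color_name = true := by rw [pv_contains_eq, hg]; rfl
        rw [if_neg (by simp [hn, hc])]
        simp [PySem.Dict.getD, hg]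
    | some rgb =>
      obtain ⟨r, g, b⟩ := rgb
      have hn : color_name ≠ "none" := by
        intro h
        rw [h] at hg
        have hnone : pvCOLORS.get? "none" = some none := by rfl
        rw [hnone] at hg
        cases hg
      have hc : pvCOLORS.contains color_name = true := by rw [pv_contains_eq, hg]; rfl
      rw [if_neg (by simp [hn, hc])]
      have hgd : pvCOLORS.getD color_name none = some (r, g, b) := by
        simp [PySem.Dict.getD, hg]
      rw [hgd]
      simp only [pvRgbToAnsi]
      congr 1
      rw [PySem.List.foldl_append_singleton_eq_map
        (f := fun line => if PySem.Chars.strip line ≠ [] then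
          ("\x1b[38;2;".toList ++ PySem.Int.toChars r ++ [';'] ++ PySem.Int.toChars g ++ [';'] ++
            PySem.Int.toChars b ++ ['m']) ++ line ++ "\x1b[0m".toList else line)]
      rw [pv_splitOn_nl]
      have hfun : (fun line => if PySem.Chars.strip line ≠ [] then
            ("\x1b[38;2;".toList ++ PySem.Int.toChars r ++ [';'] ++ PySem.Int.toChars g ++ [';'] ++
              PySem.Int.toChars b ++ ['m']) ++ line ++ "\x1b[0m".toList else line)
          = pvColorize ("\x1b[38;2;".toList ++ PySem.Int.toChars r ++ [';'] ++ PySem.Int.toChars g ++ [';'] ++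
              PySem.Int.toChars b ++ ['m']) ("\x1b[0m".toList) := by
        funext line
        simp [pvColorize]
      rw [hfun]
      have hfold := pv_fold_eq
        ("\x1b[38;2;".toList ++ PySem.Int.toChars r ++ [';'] ++ PySem.Int.toChars g ++ [';'] ++
          PySem.Int.toChars b ++ ['m']) ("\x1b[0m".toList) text.toList [] []
      simp only [pvFin, List.any_nil, List.nil_append] at hfold
      rw [hfold]
      cases hpv : pvSp text.toList with
      | nil => exact absurd hpv (pvSp_ne_nil _)
      | cons a t => simp [List.modifyHead]
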